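-- pv_equiv track=rewrite | github.com/HuardJ/EvolvedForest | evolvedforest.py | feature_combinations
-- ===== SOURCE A (Python) =====
-- def feature_combinations(n_features,depth):
--
--     # determine the node indices
--     nodes = range(2**depth - 1, 2**(depth + 1) - 1)
--
--     # feature index list
--     features = range(n_features)
--
--     # feature combinations for first node in nodes
--     node_features = [[(nodes[0],el)] for el in features]
--
--     # assign feature pairs for each node and node combination
--     current_node = 1
--     while current_node < len(nodes):
--
--         node_features = [el1 + [(nodes[current_node],el2)]
--                          for el2 in features for el1 in node_features]
--         current_node += 1
--
--     return node_features
-- ===== SOURCE B (Python) =====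
-- def feature_combinations(n_features, depth):
--     # Enumerate assignments by counting in base n_features: combination k
--     # assigns node i the i-th base-n digit of k (node 0 varies fastest).
--     start = 2 ** depth - 1
--     m = 2 ** depth
--     nodes = list(range(start, start + m))
--     if n_features <= 0:
--         return []
--     out = []
--     for code in range(n_features ** m):
--         row = []
--         c = code
--         for node in nodes:
--             row.append((node, c % n_features))
--             c //= n_features
--         out.append(row)
--     return out
-- ===== Notes on version B (the rewrite author's own statement) =====
-- stated objective: alternative
-- what changed: Replaces the incremental list-rebuilding loop (m rounds, each round re-concatenating every partial combination with a new pair) by direct enumeration: count codes 0..n^m-1 and decode each code's base-n digits into the per-node feature assignment, which reproduces A's ordering because node 0's digit is the least significant.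
import Mathlib
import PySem

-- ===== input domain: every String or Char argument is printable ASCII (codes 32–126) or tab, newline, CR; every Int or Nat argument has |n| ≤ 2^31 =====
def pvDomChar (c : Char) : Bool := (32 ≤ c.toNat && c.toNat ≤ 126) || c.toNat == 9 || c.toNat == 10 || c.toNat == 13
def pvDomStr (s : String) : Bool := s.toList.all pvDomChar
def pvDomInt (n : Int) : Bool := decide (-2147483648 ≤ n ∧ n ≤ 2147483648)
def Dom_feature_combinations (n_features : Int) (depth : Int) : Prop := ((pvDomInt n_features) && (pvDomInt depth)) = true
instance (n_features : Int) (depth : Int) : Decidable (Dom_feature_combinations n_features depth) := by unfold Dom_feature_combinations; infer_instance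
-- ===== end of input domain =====

-- B changes the algorithm: instead of A's m-round list-rebuilding loop it decodes each
-- code in range(n^m) into its base-n digits (node 0 = least significant digit); same output.

-- ===== PORT A =====
-- 'nodes[0]' cannot fail under Pre_ (nodes is nonempty for depth ≥ 0); headD 0 is its total form.
def feature_combinations (n_features : Int) (depth : Int) : List (List (Int × Int)) :=
  let nodes := PySem.List.pyRange (2 ^ depth.toNat - 1) (2 ^ (depth + 1).toNat - 1) 1
  let features := PySem.List.pyRange 0 n_features 1
  let init := features.map (fun el => [(nodes.headD 0, el)])
  (nodes.drop 1).foldl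
    (fun nf node => features.flatMap (fun el2 => nf.map (fun el1 => el1 ++ [(node, el2)]))) init

-- ===== PORT B =====
-- the inner 'for node in nodes' loop of Source B, consuming c digit by digit
def bRow (n : Int) (c : Int) (nodes : List Int) : List (Int × Int) :=
  match nodes with
  | [] => []
  | nd :: rest => (nd, PySem.Int.mod c n) :: bRow n (PySem.Int.floordiv c n) rest

def feature_combinations_alt (n_features : Int) (depth : Int) : List (List (Int × Int)) :=
  let start := (2 : Int) ^ depth.toNat - 1
  let m := (2 : Int) ^ depth.toNat
  let nodes := PySem.List.pyRange start (start + m) 1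
  if n_features ≤ 0 then []
  else (PySem.List.pyRange 0 (n_features ^ m.toNat) 1).map (fun code => bRow n_features code nodes)

-- ===== PRECONDITION & SPEC =====
-- Pre_ excludes depth < 0 (Python's 2**depth is a float there and range(float) raises TypeError)
-- and depth ≥ 63 (len(nodes) = 2**depth ≥ 2**63 makes len() raise OverflowError).
def Pre_feature_combinations (n_features : Int) (depth : Int) : Prop := 0 ≤ depth ∧ depth ≤ 62
instance (n_features : Int) (depth : Int) : Decidable (Pre_feature_combinations n_features depth) := by unfold Pre_feature_combinations; infer_instance
def pvWitness_feature_combinations : Int × Int := (2, 1)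

def Spec_feature_combinations (n_features : Int) (depth : Int) (out : List (List (Int × Int))) : Prop := out = feature_combinations_alt n_features depth
instance (n_features : Int) (depth : Int) (out : List (List (Int × Int))) : Decidable (Spec_feature_combinations n_features depth out) := by unfold Spec_feature_combinations; infer_instance

-- ===== CLAIM (what is proved, stated in full; the proofs are below) =====
def Claim_equal_feature_combinations : Prop := ∀ (n_features : Int) (depth : Int), Dom_feature_combinations n_features depth → Pre_feature_combinations n_features depth → Spec_feature_combinations n_features depth (feature_combinations n_features depth)

-- ===== LEMMAS AND PROOFS =====

-- shift a range starting at 0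
theorem pyRange_shift (c B : Int) :
    PySem.List.pyRange c (c + B) 1 = (PySem.List.pyRange 0 B 1).map (fun r => c + r) := by
  simp [PySem.List.pyRange_one, List.map_map, Function.comp_def]

-- range(0, A*B) splits into A consecutive blocks of length B
theorem range_split (B : Int) (hB : 0 ≤ B) (A : Nat) :
    PySem.List.pyRange 0 ((A : Int) * B) 1
      = (PySem.List.pyRange 0 (A : Int) 1).flatMap
          (fun f => (PySem.List.pyRange 0 B 1).map (fun r => f * B + r)) := by
  induction A with
  | zero => simp [PySem.List.pyRange_one_eq_nil]
  | succ A ih =>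
      have hA : (0 : Int) ≤ (A : Int) * B := by positivity
      have h1 : PySem.List.pyRange 0 (((A : Nat) + 1 : Nat) : Int) 1
          = PySem.List.pyRange 0 (A : Int) 1 ++ [(A : Int)] := by
        push_cast
        exact PySem.List.pyRange_one_succ_right (by positivity)
      have h2 : (((A : Nat) + 1 : Nat) : Int) * B = (A : Int) * B + B := by push_cast; ring
      rw [h2, PySem.List.pyRange_one_append 0 ((A : Int) * B) ((A : Int) * B + B) hA (by omega),
          ih, h1, List.flatMap_append]
      simp [pyRange_shift ((A : Int) * B) B]

-- decoding f * n^k + r over ns ++ [t] emits r's digits on ns, then f at t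
theorem bRow_split (n : Int) (hn : 0 < n) (t : Int) :
    ∀ (ns : List Int) (f r : Int), 0 ≤ f → f < n → 0 ≤ r → r < n ^ ns.length →
      bRow n (f * n ^ ns.length + r) (ns ++ [t]) = bRow n r ns ++ [(t, f)] := by
  intro ns
  induction ns with
  | nil =>
      intro f r hf0 hfn hr0 hr1
      have hr : r = 0 := by simp at hr1; omega
      subst hr
      simp [bRow, PySem.Int.mod_eq_emod_of_pos hn, Int.emod_eq_of_lt hf0 hfn]
  | cons nd ns ih =>
      intro f r hf0 hfn hr0 hr1
      have hP : (0 : Int) < n ^ ns.length := by positivity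
      have hpow : n ^ (nd :: ns).length = n ^ ns.length * n := by
        simp [pow_succ]
      have hc : f * n ^ (nd :: ns).length + r = r + f * n ^ ns.length * n := by
        rw [hpow]; ring
      have hmod : PySem.Int.mod (f * n ^ (nd :: ns).length + r) n = PySem.Int.mod r n := by
        rw [hc, PySem.Int.mod_eq_emod_of_pos hn, PySem.Int.mod_eq_emod_of_pos hn,
            Int.add_mul_emod_self_right _ _ _]
      have hdiv : PySem.Int.floordiv (f * n ^ (nd :: ns).length + r) n
          = f * n ^ ns.length + PySem.Int.floordiv r n := by
        rw [hc, PySem.Int.floordiv_eq_ediv_of_pos hn, PySem.Int.floordiv_eq_ediv_of_pos hn,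
            Int.add_mul_ediv_right _ _ (by omega : n ≠ 0)]
        ring
      have hq0 : 0 ≤ PySem.Int.floordiv r n := by
        rw [PySem.Int.floordiv_eq_ediv_of_pos hn]; exact Int.ediv_nonneg hr0 (by omega)
      have hq1 : PySem.Int.floordiv r n < n ^ ns.length := by
        rw [PySem.Int.floordiv_eq_ediv_of_pos hn]
        have : r < n ^ ns.length * n := by
          calc r < n ^ (nd :: ns).length := hr1
          _ = n ^ ns.length * n := hpow
        exact Int.ediv_lt_of_lt_mul hn this
      show (nd, PySem.Int.mod _ n) :: bRow n (PySem.Int.floordiv _ n) (ns ++ [t]) = _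
      rw [hmod, hdiv, ih f (PySem.Int.floordiv r n) hf0 hfn hq0 hq1]
      rfl

-- A's fold over the whole node list, started from [[]], equals B's code enumeration
theorem fold_eq (n : Int) (hn : 0 < n) (nodes : List Int) :
    nodes.foldl
        (fun nf node => (PySem.List.pyRange 0 n 1).flatMap
          (fun el2 => nf.map (fun el1 => el1 ++ [(node, el2)]))) [[]]
      = (PySem.List.pyRange 0 (n ^ nodes.length) 1).map (fun c => bRow n c nodes) := by
  induction nodes using List.reverseRecOn with
  | nil =>
      have : PySem.List.pyRange 0 (n ^ ([] : List Int).length) 1 = [0] := by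
        simpa using PySem.List.pyRange_one_singleton (a := 0)
      simp [bRow]
  | append_singleton ns t ih =>
      rw [List.foldl_append, List.foldl_cons, List.foldl_nil, ih]
      have hk : (0 : Int) ≤ n ^ ns.length := by positivity
      have hlen : (ns ++ [t]).length = ns.length + 1 := by simp
      have hsplit : PySem.List.pyRange 0 (n ^ (ns ++ [t]).length) 1
          = (PySem.List.pyRange 0 n 1).flatMap
              (fun f => (PySem.List.pyRange 0 (n ^ ns.length) 1).map
                (fun r => f * n ^ ns.length + r)) := by
        have h := range_split (n ^ ns.length) hk n.toNat
        have hcast : ((n.toNat : Int)) = n := Int.toNat_of_nonneg (by omega)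
        rw [hcast] at h
        rw [hlen, pow_succ, mul_comm (n ^ ns.length) n]
        rw [show n * n ^ ns.length = n * n ^ ns.length from rfl]
        calc PySem.List.pyRange 0 (n * n ^ ns.length) 1
            = PySem.List.pyRange 0 ((n.toNat : Int) * n ^ ns.length) 1 := by rw [hcast]
          _ = _ := by rw [range_split (n ^ ns.length) hk n.toNat, hcast]
      rw [hsplit, List.map_flatMap]
      simp only [List.map_map, Function.comp_def]
      apply List.flatMap_congr
      intro f hf
      rw [PySem.List.mem_pyRange_one] at hf
      apply List.map_congr_left
      intro r hr
      rw [PySem.List.mem_pyRange_one] at hr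
      rw [bRow_split n hn t ns f r hf.1 hf.2 hr.1 hr.2]

-- ===== VERDICT (by name: the statement is the Claim_ definition above) =====
theorem feature_combinations_spec : Claim_equal_feature_combinations := by
  intro n depth _ hpre
  have hpre' : (0 : Int) ≤ depth := hpre.1
  unfold Spec_feature_combinations feature_combinations feature_combinations_alt
  dsimp only
  have hd1 : (depth + 1).toNat = depth.toNat + 1 := by omega
  set d := depth.toNat with hdd
  have hnodes : (2 : Int) ^ (depth + 1).toNat - 1
      = ((2 : Int) ^ d - 1) + (2 : Int) ^ d := by
    rw [hd1, pow_succ]; ring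
  rw [hnodes]
  set s : Int := (2 : Int) ^ d - 1 with hs
  set m : Int := (2 : Int) ^ d with hm
  have hm0 : 0 < m := by positivity
  -- nodes is nonempty; peel off its head
  have hcons : PySem.List.pyRange s (s + m) 1 = s :: PySem.List.pyRange (s + 1) (s + m) 1 :=
    PySem.List.pyRange_one_cons (by omega)
  by_cases hn : n ≤ 0
  · -- features is empty, both sides are []
    have hF : PySem.List.pyRange 0 n 1 = [] := PySem.List.pyRange_one_eq_nil hn
    simp only [hF, List.map_nil, List.flatMap_nil, if_pos hn]
    generalize (PySem.List.pyRange s (s + m) 1).drop 1 = l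
    induction l with
    | nil => rfl
    | cons x l ih => simpa using ih
  · replace hn : (0:Int) < n := by omega
    rw [if_neg (by omega)]
    -- rewrite A's init-then-fold as a fold over the full node list from [[]]
    have hinit : (PySem.List.pyRange 0 n 1).map
        (fun el => [((PySem.List.pyRange s (s + m) 1).headD 0, el)])
        = (PySem.List.pyRange 0 n 1).flatMap
            (fun el2 => ([([] : List (Int × Int))]).map (fun el1 => el1 ++ [(s, el2)])) := by
      rw [hcons]
      simp only [List.headD_cons, List.map_cons, List.map_nil]
      induction PySem.List.pyRange 0 n 1 with
      | nil => rfl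
      | cons x F ihF => simp [List.flatMap_cons, ihF]
    rw [hinit, hcons]
    have := fold_eq n hn (s :: PySem.List.pyRange (s + 1) (s + m) 1)
    rw [List.foldl_cons] at this
    simp only [List.drop_succ_cons, List.drop_zero]
    rw [this]
    have hlen : (s :: PySem.List.pyRange (s + 1) (s + m) 1).length = m.toNat := by
      simp [PySem.List.length_pyRange_one]
      omega
    rw [hlen, ← hcons]
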